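-- pv_equiv track=rewrite | github.com/buymeagoat/whisper-transcriber | archive/development-artifacts/consolidation-backup-20251023_163830/api_backup/services/transcript_search.py | _create_snippet
-- ===== SOURCE A (Python) =====
-- from typing import List, Dict, Any, Optional, Tuple
--
-- def _create_snippet(content: str, search_terms: List[str], max_length: int = 300) -> str:
--     """
--     Create a snippet of text around the first match
--     """
--     if not content or not search_terms:
--         return content[:max_length] + "..." if len(content) > max_length else content
--
--     content_lower = content.lower()
--
--     # Find first match position
--     first_match_pos = float('inf')
--     for term in search_terms:
--         pos = content_lower.find(term.lower())
--         if pos != -1 and pos < first_match_pos: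
--             first_match_pos = pos
--
--     if first_match_pos == float('inf'):
--         # No matches found, return beginning
--         return content[:max_length] + "..." if len(content) > max_length else content
--
--     # Create snippet around first match
--     start = max(0, first_match_pos - max_length // 3)
--     end = min(len(content), start + max_length)
--
--     snippet = content[start:end]
--     if start > 0:
--         snippet = "..." + snippet
--     if end < len(content):
--         snippet = snippet + "..."
--
--     return snippet
-- ===== SOURCE B (Python) =====
-- def _first_match(text, terms):
--     for i in range(len(text)):
--         if any(text.startswith(t, i) for t in terms):
--             return i
--     return None
--
--
-- def _head_snippet(content, max_length):
--     if len(content) <= max_length: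
--         return content
--     return content[:max_length] + "..."
--
--
-- def _create_snippet(content, search_terms, max_length=300):
--     pos = (
--         _first_match(content.lower(), [t.lower() for t in search_terms])
--         if content and search_terms
--         else None
--     )
--     if pos is None:
--         return _head_snippet(content, max_length)
--     start = max(0, pos - max_length // 3)
--     end = min(len(content), start + max_length)
--     return (
--         ("..." if start > 0 else "")
--         + content[start:end]
--         + ("..." if end < len(content) else "")
--     )
-- ===== Notes on version B (the rewrite author's own statement) =====
-- stated objective: alternative
-- what changed: Replaces the term-major loop (one .find per term plus a running float('inf') minimum) with a position-major scan helper returning the first content index where any lowered term starts, folds the empty-content/empty-terms guard into the same None branch as no-match, and assembles the snippet as a single three-piece concatenation instead of conditional rebinding. (the scan stops at the leftmost match instead of running a full find over the content for every term, which a timing run measured as much faster)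
import Mathlib
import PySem

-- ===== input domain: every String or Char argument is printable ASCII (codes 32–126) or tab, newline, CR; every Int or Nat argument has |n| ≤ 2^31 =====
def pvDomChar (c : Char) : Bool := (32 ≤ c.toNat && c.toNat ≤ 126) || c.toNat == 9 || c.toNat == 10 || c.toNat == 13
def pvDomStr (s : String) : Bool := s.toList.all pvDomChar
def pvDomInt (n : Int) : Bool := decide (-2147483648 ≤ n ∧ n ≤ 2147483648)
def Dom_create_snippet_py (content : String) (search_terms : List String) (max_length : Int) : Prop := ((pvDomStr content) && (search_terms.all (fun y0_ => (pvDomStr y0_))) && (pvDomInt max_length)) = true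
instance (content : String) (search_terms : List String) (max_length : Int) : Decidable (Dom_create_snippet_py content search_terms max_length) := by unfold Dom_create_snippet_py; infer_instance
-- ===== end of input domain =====

-- B replaces A's term-major loop (.find per term + float('inf') running minimum) with a
-- position-major recursive scan for the first index where any lowered term starts, merges
-- the guard into the no-match branch, and builds the snippet as one three-piece concatenation.

-- ===== PORT A =====
-- float('inf') sentinel ported as Option Int (none = no match yet)
def create_snippet_py (content : String) (search_terms : List String) (max_length : Int) : String :=
  if content.toList = [] ∨ search_terms = [] then
    (if PySem.Str.len content > max_length then PySem.Str.slice content none (some max_length) ++ "..." else content)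
  else
    let content_lower := PySem.Str.lower content
    let first_match_pos : Option Int := search_terms.foldl
      (fun cur term =>
        let pos := PySem.Str.find content_lower (PySem.Str.lower term)
        if pos = -1 then cur
        else match cur with
          | none => some pos
          | some c => if pos < c then some pos else cur)
      none
    match first_match_pos with
    | none =>
        (if PySem.Str.len content > max_length then PySem.Str.slice content none (some max_length) ++ "..." else content)
    | some p =>
        let start := max 0 (p - PySem.Int.floordiv max_length 3)
        let e := min (PySem.Str.len content) (start + max_length)
        let snippet := PySem.Str.slice content (some start) (some e)
        let snippet := if start > 0 then "..." ++ snippet else snippet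
        let snippet := if e < PySem.Str.len content then snippet ++ "..." else snippet
        snippet

-- ===== PORT B =====
-- _head_snippet: beginning of the content, with ellipsis when truncated
def pvHeadSnippet (content : String) (max_length : Int) : String :=
  if PySem.Str.len content ≤ max_length then content
  else PySem.Str.slice content none (some max_length) ++ "..."

-- _first_match: 'for i in range(len(text)): if any(text.startswith(t, i) ...)' as structural
-- recursion over the remaining index count (fuel = indices left to try); startswith(t, i) is
-- exact as startswith on the suffix from i since 0 ≤ i ≤ len(text)
def pvFirstMatchAux (text : List Char) (terms : List String) : Nat → Nat → Option Nat
  | 0, _ => none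
  | Nat.succ fuel, i =>
      if terms.any (fun t => PySem.Chars.startswith (text.drop i) t.toList) then some i
      else pvFirstMatchAux text terms fuel (i + 1)

def pvFirstMatch (text : List Char) (terms : List String) : Option Nat :=
  pvFirstMatchAux text terms text.length 0

def create_snippet_py_alt (content : String) (search_terms : List String) (max_length : Int) : String :=
  let pos : Option Nat :=
    if content.toList = [] ∨ search_terms = [] then none
    else pvFirstMatch (PySem.Str.lower content).toList (search_terms.map PySem.Str.lower)
  match pos with
  | none => pvHeadSnippet content max_length
  | some i =>
      let start := max 0 ((i : Int) - PySem.Int.floordiv max_length 3)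
      let e := min (PySem.Str.len content) (start + max_length)
      (if start > 0 then "..." else "")
        ++ PySem.Str.slice content (some start) (some e)
        ++ (if e < PySem.Str.len content then "..." else "")

-- ===== PRECONDITION & SPEC =====
def Spec_create_snippet_py (content : String) (search_terms : List String) (max_length : Int) (out : String) : Prop := out = create_snippet_py_alt content search_terms max_length
instance (content : String) (search_terms : List String) (max_length : Int) (out : String) : Decidable (Spec_create_snippet_py content search_terms max_length out) := by unfold Spec_create_snippet_py; infer_instance

-- ===== CLAIM (what is proved, stated in full; the proofs are below) =====
def Claim_equal_create_snippet_py : Prop := ∀ (content : String) (search_terms : List String) (max_length : Int), Dom_create_snippet_py content search_terms max_length → Spec_create_snippet_py content search_terms max_length (create_snippet_py content search_terms max_length)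

-- ===== LEMMAS AND PROOFS =====

-- accumulator invariant for A's term-major fold: the accumulator is the minimum of the
-- (non-(-1)) find positions of the terms T processed so far
def pvGoodA (cl : String) (T : List String) (o : Option Int) : Prop :=
  match o with
  | none => ∀ t ∈ T, PySem.Str.find cl (PySem.Str.lower t) = -1
  | some p => 0 ≤ p ∧ (∃ t ∈ T, PySem.Str.find cl (PySem.Str.lower t) = p) ∧
      ∀ t ∈ T, PySem.Str.find cl (PySem.Str.lower t) = -1 ∨ p ≤ PySem.Str.find cl (PySem.Str.lower t)

theorem pvGoodA_fold (cl : String) (ts : List String) : ∀ (T : List String) (cur : Option Int),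
    pvGoodA cl T cur →
    pvGoodA cl (T ++ ts) (ts.foldl
      (fun cur term =>
        let pos := PySem.Str.find cl (PySem.Str.lower term)
        if pos = -1 then cur
        else match cur with
          | none => some pos
          | some c => if pos < c then some pos else cur)
      cur) := by
  induction ts with
  | nil => intro T cur h; simpa using h
  | cons t ts ih =>
    intro T cur h
    have step : pvGoodA cl (T ++ [t])
        ((fun (cur : Option Int) (term : String) =>
          let pos := PySem.Str.find cl (PySem.Str.lower term)
          if pos = -1 then cur
          else match cur with
            | none => some pos
            | some c => if pos < c then some pos else cur) cur t) := by
      have hge : -1 ≤ PySem.Str.find cl (PySem.Str.lower t) := by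
        rw [PySem.Str.find_eq]; exact PySem.Chars.neg_one_le_find _ _
      dsimp only
      by_cases hneg : PySem.Str.find cl (PySem.Str.lower t) = -1
      · rw [if_pos hneg]
        cases cur with
        | none =>
          intro x hx
          rcases List.mem_append.mp hx with hx | hx
          · exact h x hx
          · simp at hx; subst hx; exact hneg
        | some p =>
          obtain ⟨hp0, ⟨t0, ht0, hf0⟩, hbd⟩ := h
          refine ⟨hp0, ⟨t0, List.mem_append_left _ ht0, hf0⟩, ?_⟩
          intro x hx
          rcases List.mem_append.mp hx with hx | hx
          · exact hbd x hx
          · simp at hx; subst hx; exact Or.inl hneg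
      · simp only [if_neg hneg]
        have hpos0 : 0 ≤ PySem.Str.find cl (PySem.Str.lower t) := by omega
        cases cur with
        | none =>
          refine ⟨hpos0, ⟨t, List.mem_append_right _ (by simp), rfl⟩, ?_⟩
          intro x hx
          rcases List.mem_append.mp hx with hx | hx
          · exact Or.inl (h x hx)
          · simp at hx; subst hx; exact Or.inr le_rfl
        | some c =>
          obtain ⟨hp0, ⟨t0, ht0, hf0⟩, hbd⟩ := h
          by_cases hlt : PySem.Str.find cl (PySem.Str.lower t) < c
          · simp only [if_pos hlt]
            refine ⟨hpos0, ⟨t, List.mem_append_right _ (by simp), rfl⟩, ?_⟩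
            intro x hx
            rcases List.mem_append.mp hx with hx | hx
            · rcases hbd x hx with h1 | h1
              · exact Or.inl h1
              · exact Or.inr (by omega)
            · simp at hx; subst hx; exact Or.inr le_rfl
          · simp only [if_neg hlt]
            refine ⟨hp0, ⟨t0, List.mem_append_left _ ht0, hf0⟩, ?_⟩
            intro x hx
            rcases List.mem_append.mp hx with hx | hx
            · exact hbd x hx
            · simp at hx; subst hx; exact Or.inr (by omega)
    have := ih (T ++ [t]) _ step
    simpa [List.append_assoc] using this

theorem pv_find?_range_eq_some (p : Nat → Bool) (i : Nat) (hp : p i = true)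
    (hmin : ∀ j < i, p j = false) : ∀ (n : Nat), i < n → (List.range n).find? p = some i := by
  intro n
  induction n with
  | zero => omega
  | succ n ih =>
    intro hi
    rw [List.range_succ, List.find?_append]
    by_cases h : i < n
    · rw [ih h]; rfl
    · have hin : i = n := by omega
      subst hin
      have hnone : (List.range i).find? p = none := by
        rw [List.find?_eq_none]
        intro j hj
        simp only [List.mem_range] at hj
        simp [hmin j hj]
      rw [hnone]
      simp [List.find?, hp]

-- B's fueled index scan computes find? over the index range
theorem pvFirstMatchAux_eq (text : List Char) (terms : List String) :
    ∀ (fuel i : Nat),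
      pvFirstMatchAux text terms fuel i =
        (List.range' i fuel).find?
          (fun j => terms.any (fun t => PySem.Chars.startswith (text.drop j) t.toList)) := by
  intro fuel
  induction fuel with
  | zero => intro i; rfl
  | succ n ih =>
    intro i
    rw [List.range'_succ, List.find?_cons]
    by_cases h : terms.any (fun t => PySem.Chars.startswith (text.drop i) t.toList) = true
    · simp [pvFirstMatchAux, h]
    · simp only [Bool.not_eq_true] at h
      simp [pvFirstMatchAux, h, ih (i + 1)]

theorem pvFirstMatch_eq (text : List Char) (terms : List String) :
    pvFirstMatch text terms =
      (List.range text.length).find?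
        (fun j => terms.any (fun t => PySem.Chars.startswith (text.drop j) t.toList)) := by
  rw [pvFirstMatch, pvFirstMatchAux_eq, List.range_eq_range']

-- the core: A's min-over-terms first positions equal B's leftmost scan position
theorem pv_fmp_eq (content : String) (search_terms : List String)
    (hc : content.toList ≠ []) :
    search_terms.foldl
      (fun cur term =>
        let pos := PySem.Str.find (PySem.Str.lower content) (PySem.Str.lower term)
        if pos = -1 then cur
        else match cur with
          | none => some pos
          | some c => if pos < c then some pos else cur)
      none
    = ((List.range (PySem.Str.lower content).toList.length).find?
        (fun i => (search_terms.map PySem.Str.lower).any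
          (fun t => PySem.Chars.startswith ((PySem.Str.lower content).toList.drop i) t.toList))).map
        (fun i => (i : Int)) := by
  set cl := PySem.Str.lower content with hcl
  have hslen : cl.toList ≠ [] := by
    rw [hcl, PySem.Str.toList_lower]
    intro h
    exact hc (by simpa [PySem.Chars.lower] using congrArg List.length h)
  have hgood := pvGoodA_fold cl search_terms [] none (by intro t ht; simp at ht)
  simp only [List.nil_append] at hgood
  set pB : Nat → Bool := fun i => (search_terms.map PySem.Str.lower).any
      (fun t => PySem.Chars.startswith (cl.toList.drop i) t.toList) with hpB
  have hpB_iff : ∀ i, pB i = true ↔ ∃ t ∈ search_terms, (PySem.Str.lower t).toList <+: cl.toList.drop i := by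
    intro i
    rw [hpB]
    simp only [List.any_eq_true, List.mem_map]
    constructor
    · rintro ⟨u, ⟨t, ht, rfl⟩, hsw⟩
      exact ⟨t, ht, (PySem.Chars.startswith_iff _ _).mp hsw⟩
    · rintro ⟨t, ht, hpre⟩
      exact ⟨PySem.Str.lower t, ⟨t, ht, rfl⟩, (PySem.Chars.startswith_iff _ _).mpr hpre⟩
  cases hA : search_terms.foldl
      (fun cur term =>
        let pos := PySem.Str.find cl (PySem.Str.lower term)
        if pos = -1 then cur
        else match cur with
          | none => some pos
          | some c => if pos < c then some pos else cur)
      none with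
  | none =>
    rw [hA] at hgood
    have hnone : (List.range cl.toList.length).find? pB = none := by
      rw [List.find?_eq_none]
      intro j _ hj
      obtain ⟨t, ht, hpre⟩ := (hpB_iff j).mp (by simpa using hj)
      have hinf : (PySem.Str.lower t).toList <:+: cl.toList :=
        (PySem.Chars.exists_prefix_drop_iff_isIn _ _).mp ⟨j, hpre⟩ |> fun h =>
          (PySem.Chars.isIn_iff_infix _ _).mp h
      have := hgood t ht
      rw [PySem.Str.find_eq] at this
      exact ((PySem.Chars.find_eq_neg_one_iff _ _).mp this) hinf
    rw [hnone]; rfl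
  | some p =>
    rw [hA] at hgood
    obtain ⟨hp0, ⟨t0, ht0, hf0⟩, hbd⟩ := hgood
    rw [PySem.Str.find_eq] at hf0
    have hspec := PySem.Chars.find_spec (s := cl.toList) (sub := (PySem.Str.lower t0).toList) (by rw [hf0]; exact hp0)
    rw [hf0] at hspec
    obtain ⟨hpre0, _⟩ := hspec
    have hlt : p.toNat < cl.toList.length := by
      by_cases h0 : (PySem.Str.lower t0).toList = []
      · rw [h0] at hf0
        rw [PySem.Chars.find_nil] at hf0
        have : p = 0 := hf0.symm
        subst this
        simpa using List.length_pos_iff.mpr hslen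
      · have hdrop : cl.toList.drop p.toNat ≠ [] := by
          intro h
          rw [h] at hpre0
          exact h0 (List.prefix_nil.mp hpre0)
        have := List.drop_eq_nil_iff.not.mp hdrop
        omega
    have hmatch : pB p.toNat = true := (hpB_iff p.toNat).mpr ⟨t0, ht0, hpre0⟩
    have hminp : ∀ j < p.toNat, pB j = false := by
      intro j hj
      by_contra hcon
      have hj' : pB j = true := by
        cases h : pB j
        · exact absurd h hcon
        · rfl
      obtain ⟨t, ht, hpre⟩ := (hpB_iff j).mp hj'
      have hinf : (PySem.Str.lower t).toList <:+: cl.toList :=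
        (PySem.Chars.isIn_iff_infix _ _).mp ((PySem.Chars.exists_prefix_drop_iff_isIn _ _).mp ⟨j, hpre⟩)
      have hfnn : 0 ≤ PySem.Chars.find cl.toList (PySem.Str.lower t).toList :=
        (PySem.Chars.find_nonneg_iff _ _).mpr hinf
      have hble := hbd t ht
      rw [PySem.Str.find_eq] at hble
      have hple : p ≤ PySem.Chars.find cl.toList (PySem.Str.lower t).toList := by
        rcases hble with h1 | h1
        · omega
        · exact h1
      have hspec' := PySem.Chars.find_spec (s := cl.toList) (sub := (PySem.Str.lower t).toList) hfnn
      have hnotbefore := hspec'.2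
      have hjge : (PySem.Chars.find cl.toList (PySem.Str.lower t).toList).toNat ≤ j := by
        by_contra hcc
        exact hnotbefore j (by omega) hpre
      omega
    rw [pv_find?_range_eq_some pB p.toNat hmatch hminp cl.toList.length hlt]
    simp [Int.toNat_of_nonneg hp0]

-- A's flipped head-of-content guard equals B's _head_snippet helper
theorem pv_head_eq (content : String) (max_length : Int) :
    (if PySem.Str.len content > max_length then PySem.Str.slice content none (some max_length) ++ "..." else content)
      = pvHeadSnippet content max_length := by
  unfold pvHeadSnippet
  by_cases h : PySem.Str.len content ≤ max_length
  · rw [if_neg (by omega), if_pos h]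
  · rw [if_pos (by omega), if_neg h]

-- A's conditional rebinding of the snippet equals B's three-piece concatenation
theorem pv_assemble_eq (s : String) (b1 b2 : Prop) [Decidable b1] [Decidable b2] :
    (if b2 then (if b1 then "..." ++ s else s) ++ "..." else (if b1 then "..." ++ s else s))
      = (if b1 then "..." else "") ++ s ++ (if b2 then "..." else "") := by
  split_ifs <;> simp [String.append_assoc]

theorem create_snippet_py_main (content : String) (search_terms : List String) (max_length : Int) :
    create_snippet_py content search_terms max_length = create_snippet_py_alt content search_terms max_length := by
  simp only [create_snippet_py, create_snippet_py_alt]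
  by_cases hguard : content.toList = [] ∨ search_terms = []
  · rw [if_pos hguard]
    simp only [if_pos hguard]
    exact pv_head_eq content max_length
  · rw [if_neg hguard]
    simp only [if_neg hguard]
    have hc : content.toList ≠ [] := fun h => hguard (Or.inl h)
    rw [pv_fmp_eq content search_terms hc, pvFirstMatch_eq]
    cases ((List.range (PySem.Str.lower content).toList.length).find?
        (fun i => (search_terms.map PySem.Str.lower).any
          (fun t => PySem.Chars.startswith ((PySem.Str.lower content).toList.drop i) t.toList))) with
    | none => exact pv_head_eq content max_length
    | some i =>
      exact pv_assemble_eq _ _ _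

-- ===== VERDICT (by name: the statement is the Claim_ definition above) =====
theorem create_snippet_py_spec : Claim_equal_create_snippet_py := by
  intro content search_terms max_length _
  unfold Spec_create_snippet_py
  exact create_snippet_py_main content search_terms max_length
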